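-- pv_equiv track=rewrite | github.com/Yangjunyeong/dailywork | d06_1.py | de_identify
-- ===== SOURCE A (Python) =====
-- def de_identify(num):
--     a = ''
--     if len(num) == 14:
--         for i in range(14):
--             if i in range(0,6):
--
--                 a = a + num[i]
--             elif i in range(6,13):
--                 a = a + '*'
--
--     if len(num) == 13:
--         for i in range(13):
--             if i in range(0,6):
--                 a = a + num[i]
--             else:
--                 a = a + '*'
--
--     return a
-- ===== SOURCE B (Python) =====
-- def de_identify(num):
--     if len(num) in (13, 14):
--         return num[:6] + '*' * 7
--     return ''
-- ===== Notes on version B (the rewrite author's own statement) =====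
-- stated objective: simpler
-- what changed: Replaced the two per-index loops with range-membership branches by a single closed-form slice: for length 13 or 14 return num[:6] + '*'*7 (length 14 drops index 13, so exactly 7 stars), else ''.
import Mathlib
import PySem

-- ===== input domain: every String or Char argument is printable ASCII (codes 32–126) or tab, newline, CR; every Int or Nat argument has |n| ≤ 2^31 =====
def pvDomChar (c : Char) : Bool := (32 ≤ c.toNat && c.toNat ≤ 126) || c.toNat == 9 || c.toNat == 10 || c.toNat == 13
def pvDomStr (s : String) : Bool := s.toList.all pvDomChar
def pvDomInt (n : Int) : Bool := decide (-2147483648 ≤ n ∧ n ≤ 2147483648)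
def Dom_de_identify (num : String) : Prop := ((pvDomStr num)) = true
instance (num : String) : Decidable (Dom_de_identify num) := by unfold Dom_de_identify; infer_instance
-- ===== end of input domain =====

-- B replaces A's two index loops with a closed-form slice: num[:6] + 7 stars for length 13/14, '' otherwise (simpler).

-- ===== PORT A =====
-- the loop body for length 14: for i in range(14): if i in range(0,6): a += num[i] elif i in range(6,13): a += '*'
-- num[i] is in range whenever the branch is reached, so pyGet?'s none case (IndexError) never fires; .elim [] ([·]) is exact there.
def deId_loop14 (l : List Char) (a : List Char) : List Char :=
  (PySem.List.pyRange 0 14 1).foldl (fun a i =>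
    if (PySem.List.pyRange 0 6 1).contains i then a ++ ((PySem.List.pyGet? l i).elim [] ([·]))
    else if (PySem.List.pyRange 6 13 1).contains i then a ++ ['*']
    else a) a

-- the loop body for length 13: for i in range(13): if i in range(0,6): a += num[i] else: a += '*'
def deId_loop13 (l : List Char) (a : List Char) : List Char :=
  (PySem.List.pyRange 0 13 1).foldl (fun a i =>
    if (PySem.List.pyRange 0 6 1).contains i then a ++ ((PySem.List.pyGet? l i).elim [] ([·]))
    else a ++ ['*']) a

def de_identify (num : String) : String :=
  let l := num.toList
  let a : List Char := []
  let a := if l.length == 14 then deId_loop14 l a else a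
  let a := if l.length == 13 then deId_loop13 l a else a
  String.ofList a

-- ===== PORT B =====
def de_identify_alt (num : String) : String :=
  let l := num.toList
  if l.length == 13 || l.length == 14 then
    String.ofList (PySem.List.slice l none (some 6) ++ List.replicate 7 '*')
  else String.ofList []

-- ===== PRECONDITION & SPEC =====
def Spec_de_identify (num : String) (out : String) : Prop := out = de_identify_alt num
instance (num : String) (out : String) : Decidable (Spec_de_identify num out) := by unfold Spec_de_identify; infer_instance

-- ===== CLAIM (what is proved, stated in full; the proofs are below) =====
def Claim_equal_de_identify : Prop := ∀ (num : String), Dom_de_identify num → Spec_de_identify num (de_identify num)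

-- ===== LEMMAS AND PROOFS =====
lemma slice_to_six (l : List Char) : PySem.List.slice l none (some 6) = l.take 6 := by
  have h6 : ((6:Int).toNat) = 6 := rfl
  rw [PySem.List.slice_to l (by norm_num : (0:Int) ≤ 6), h6]

set_option maxHeartbeats 2000000 in
lemma deId_loop14_eq (l : List Char) (h : l.length = 14) :
    deId_loop14 l [] = l.take 6 ++ List.replicate 7 '*' :=
  match l, h with
  | [c0,c1,c2,c3,c4,c5,c6,c7,c8,c9,c10,c11,c12,c13], _ => rfl

set_option maxHeartbeats 2000000 in
lemma deId_loop13_eq (l : List Char) (h : l.length = 13) :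
    deId_loop13 l [] = l.take 6 ++ List.replicate 7 '*' :=
  match l, h with
  | [c0,c1,c2,c3,c4,c5,c6,c7,c8,c9,c10,c11,c12], _ => rfl

-- ===== VERDICT (by name: the statement is the Claim_ definition above) =====
theorem de_identify_spec : Claim_equal_de_identify := by
  intro num _
  unfold Spec_de_identify de_identify de_identify_alt
  by_cases h14 : num.toList.length = 14
  · simp [h14, deId_loop14_eq _ h14, slice_to_six]
  · by_cases h13 : num.toList.length = 13
    · simp [h13, deId_loop13_eq _ h13, slice_to_six]
    · have h13' : num.length ≠ 13 := by simpa using h13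
      have h14' : num.length ≠ 14 := by simpa using h14
      simp [h13', h14']
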